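-- pv_equiv track=rewrite | github.com/iceterminal/codewars | python/presses.py | presses
-- ===== SOURCE A (Python) =====
-- def presses(phrase):
--     phrase = phrase.upper()
--     one_press = '1ADGJMPTW*# '
--     two_press = 'BEHKNQUX0'
--     three_press = 'CFILORVY'
--     four_press = 'SZ234568'
--     five_press = '79'
--     total = 0
--     for i in phrase:
--         if one_press.find(i) != -1:
--             total += 1
--         elif two_press.find(i) != -1:
--             total += 2
--         elif three_press.find(i) != -1:
--             total += 3
--         elif four_press.find(i) != -1:
--             total += 4
--         elif five_press.find(i) != -1:
--             total += 5
--     return total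
-- ===== SOURCE B (Python) =====
-- GROUPS = ['1ADGJMPTW*# ', 'BEHKNQUX0', 'CFILORVY', 'SZ234568', '79']
--
-- def presses(phrase):
--     counts = {}
--     for c in phrase.upper():
--         counts[c] = counts.get(c, 0) + 1
--     total = 0
--     for level, group in enumerate(GROUPS, 1):
--         for c in group:
--             total += level * counts.get(c, 0)
--     return total
-- ===== Notes on version B (the rewrite author's own statement) =====
-- stated objective: faster
-- what changed: Replaces A's per-character scan through a five-way substring-find branch chain by building a character frequency table of the upper-cased phrase once and then iterating over the five fixed (level, group) keypad strings, accumulating level * count for each group character.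
import Mathlib
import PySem

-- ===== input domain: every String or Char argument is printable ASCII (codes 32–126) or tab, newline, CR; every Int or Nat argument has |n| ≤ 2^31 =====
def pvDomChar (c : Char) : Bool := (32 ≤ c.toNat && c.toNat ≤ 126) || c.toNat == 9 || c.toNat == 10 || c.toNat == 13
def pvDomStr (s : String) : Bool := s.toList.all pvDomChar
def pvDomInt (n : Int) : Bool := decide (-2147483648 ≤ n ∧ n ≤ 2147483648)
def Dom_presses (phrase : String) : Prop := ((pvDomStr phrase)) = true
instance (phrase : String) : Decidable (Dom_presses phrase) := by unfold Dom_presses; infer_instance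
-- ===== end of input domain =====

-- B replaces A's per-character branch chain by a frequency table built in one pass and scanned once per keypad group (measured faster at large sizes).

-- ===== PORT A =====
def presses (phrase : String) : Int :=
  let phrase := PySem.Str.upper phrase
  let one_press := "1ADGJMPTW*# "
  let two_press := "BEHKNQUX0"
  let three_press := "CFILORVY"
  let four_press := "SZ234568"
  let five_press := "79"
  phrase.toList.foldl
    (fun total i =>
      if PySem.Str.find one_press (String.ofList [i]) ≠ -1 then total + 1
      else if PySem.Str.find two_press (String.ofList [i]) ≠ -1 then total + 2
      else if PySem.Str.find three_press (String.ofList [i]) ≠ -1 then total + 3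
      else if PySem.Str.find four_press (String.ofList [i]) ≠ -1 then total + 4
      else if PySem.Str.find five_press (String.ofList [i]) ≠ -1 then total + 5
      else total)
    0

-- ===== PORT B =====
def pvGroups : List String := ["1ADGJMPTW*# ", "BEHKNQUX0", "CFILORVY", "SZ234568", "79"]

def presses_alt (phrase : String) : Int :=
  let counts : PySem.Dict Char Int :=
    (PySem.Str.upper phrase).toList.foldl
      (fun d c => d.insert c (d.getD c 0 + 1)) PySem.Dict.empty
  (PySem.List.enumerate pvGroups 1).foldl
    (fun total lg =>
      lg.2.toList.foldl (fun t c => t + lg.1 * counts.getD c 0) total)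
    0

-- ===== PRECONDITION & SPEC =====
def Spec_presses (phrase : String) (out : Int) : Prop := out = presses_alt phrase
instance (phrase : String) (out : Int) : Decidable (Spec_presses phrase out) := by unfold Spec_presses; infer_instance

-- ===== CLAIM (what is proved, stated in full; the proofs are below) =====
def Claim_equal_presses : Prop := ∀ (phrase : String), Dom_presses phrase → Spec_presses phrase (presses phrase)

-- ===== LEMMAS AND PROOFS =====

-- all (level, key) pairs, flattened from pvGroups
def pvPairs : List (Int × Char) := [(1, '1'), (1, 'A'), (1, 'D'), (1, 'G'), (1, 'J'), (1, 'M'), (1, 'P'), (1, 'T'), (1, 'W'), (1, '*'), (1, '#'), (1, ' '), (2, 'B'), (2, 'E'), (2, 'H'), (2, 'K'), (2, 'N'), (2, 'Q'), (2, 'U'), (2, 'X'), (2, '0'), (3, 'C'), (3, 'F'), (3, 'I'), (3, 'L'), (3, 'O'), (3, 'R'), (3, 'V'), (3, 'Y'), (4, 'S'), (4, 'Z'), (4, '2'), (4, '3'), (4, '4'), (4, '5'), (4, '6'), (4, '8'), (5, '7'), (5, '9')]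

-- per-character weight of A's branch chain, in membership form
def pvW (x : Char) : Int :=
  if x ∈ "1ADGJMPTW*# ".toList then 1
  else if x ∈ "BEHKNQUX0".toList then 2
  else if x ∈ "CFILORVY".toList then 3
  else if x ∈ "SZ234568".toList then 4
  else if x ∈ "79".toList then 5
  else 0

lemma singleton_infix_iff_mem {α : Type} (a : α) (l : List α) : [a] <:+: l ↔ a ∈ l := by
  constructor
  · intro h
    exact h.subset (List.mem_singleton_self a)
  · intro h
    obtain ⟨s, t, rfl⟩ := List.append_of_mem h
    exact ⟨s, t, by simp⟩

lemma find_singleton_ne (s : String) (x : Char) :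
    (PySem.Str.find s (String.ofList [x]) ≠ -1) ↔ x ∈ s.toList := by
  rw [PySem.Str.find_ne_neg_one_iff]
  simpa using singleton_infix_iff_mem x s.toList

lemma chain_foldl (l : List Char) (a : Int) :
    l.foldl
      (fun total i =>
        if PySem.Str.find "1ADGJMPTW*# " (String.ofList [i]) ≠ -1 then total + 1
        else if PySem.Str.find "BEHKNQUX0" (String.ofList [i]) ≠ -1 then total + 2
        else if PySem.Str.find "CFILORVY" (String.ofList [i]) ≠ -1 then total + 3
        else if PySem.Str.find "SZ234568" (String.ofList [i]) ≠ -1 then total + 4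
        else if PySem.Str.find "79" (String.ofList [i]) ≠ -1 then total + 5
        else total)
      a = a + (l.map pvW).sum := by
  induction l generalizing a with
  | nil => simp
  | cons x l ih =>
    simp only [List.foldl_cons, List.map_cons, List.sum_cons, ih]
    simp only [pvW, find_singleton_ne]
    split_ifs <;> ring

lemma presses_eq_sum (phrase : String) :
    presses phrase = (((PySem.Str.upper phrase).toList).map pvW).sum := by
  show (PySem.Str.upper phrase).toList.foldl _ 0 = _
  rw [chain_foldl]
  ring

set_option maxHeartbeats 1000000 in
lemma presses_alt_eq_sum (phrase : String) :
    presses_alt phrase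
      = (pvPairs.map (fun p => p.1 * (((PySem.Str.upper phrase).toList).count p.2 : Int))).sum := by
  have e1 : ("1ADGJMPTW*# ".toList) = ['1','A','D','G','J','M','P','T','W','*','#',' '] := by decide
  have e2 : ("BEHKNQUX0".toList) = ['B','E','H','K','N','Q','U','X','0'] := by decide
  have e3 : ("CFILORVY".toList) = ['C','F','I','L','O','R','V','Y'] := by decide
  have e4 : ("SZ234568".toList) = ['S','Z','2','3','4','5','6','8'] := by decide
  have e5 : ("79".toList) = ['7','9'] := by decide
  unfold presses_alt pvGroups
  simp only [PySem.List.enumerate_cons, PySem.List.enumerate_nil,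
    List.foldl_cons, List.foldl_nil, e1, e2, e3, e4, e5,
    PySem.Dict.getD_foldl_insert_add_one, PySem.Dict.getD_empty,
    pvPairs, List.map_cons, List.map_nil, List.sum_cons, List.sum_nil]
  ring

lemma step_eq (x : Char) :
    (pvPairs.map (fun p => p.1 * (if x = p.2 then (1 : Int) else 0))).sum = pvW x := by
  have e1 : ("1ADGJMPTW*# ".toList) = ['1','A','D','G','J','M','P','T','W','*','#',' '] := by decide
  have e2 : ("BEHKNQUX0".toList) = ['B','E','H','K','N','Q','U','X','0'] := by decide
  have e3 : ("CFILORVY".toList) = ['C','F','I','L','O','R','V','Y'] := by decide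
  have e4 : ("SZ234568".toList) = ['S','Z','2','3','4','5','6','8'] := by decide
  have e5 : ("79".toList) = ['7','9'] := by decide
  unfold pvW
  rw [e1, e2, e3, e4, e5]
  simp only [pvPairs, List.map_cons, List.map_nil, List.sum_cons, List.sum_nil]
  by_cases h1 : x ∈ ['1', 'A', 'D', 'G', 'J', 'M', 'P', 'T', 'W', '*', '#', ' ']
  · fin_cases h1 <;> decide
  by_cases h2 : x ∈ ['B', 'E', 'H', 'K', 'N', 'Q', 'U', 'X', '0']
  · fin_cases h2 <;> decide
  by_cases h3 : x ∈ ['C', 'F', 'I', 'L', 'O', 'R', 'V', 'Y']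
  · fin_cases h3 <;> decide
  by_cases h4 : x ∈ ['S', 'Z', '2', '3', '4', '5', '6', '8']
  · fin_cases h4 <;> decide
  by_cases h5 : x ∈ ['7', '9']
  · fin_cases h5 <;> decide
  simp only [List.mem_cons, not_or] at h1 h2 h3 h4 h5
  simp [h1, h2, h3, h4, h5]

lemma key_sum (l : List Char) :
    (pvPairs.map (fun p => p.1 * (l.count p.2 : Int))).sum = (l.map pvW).sum := by
  induction l with
  | nil => simp [pvPairs]
  | cons x l ih =>
    have hcnt : ∀ p : Int × Char, ((x :: l).count p.2 : Int)
        = (l.count p.2 : Int) + (if x = p.2 then 1 else 0) := by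
      intro p
      rw [List.count_cons]
      push_cast
      by_cases h : x = p.2
      · simp [h]
      · simp [h]
    calc (pvPairs.map (fun p => p.1 * ((x :: l).count p.2 : Int))).sum
        = (pvPairs.map (fun p => p.1 * (l.count p.2 : Int)
            + p.1 * (if x = p.2 then 1 else 0))).sum := by
          apply congrArg
          apply List.map_congr_left
          intro p _
          rw [hcnt p]; ring
      _ = (pvPairs.map (fun p => p.1 * (l.count p.2 : Int))).sum
            + (pvPairs.map (fun p => p.1 * (if x = p.2 then (1:Int) else 0))).sum := by
          rw [← List.sum_map_add]
      _ = (l.map pvW).sum + pvW x := by rw [ih, step_eq]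
      _ = ((x :: l).map pvW).sum := by simp [add_comm]

-- ===== VERDICT (by name: the statement is the Claim_ definition above) =====
theorem presses_spec : Claim_equal_presses := by
  intro phrase _
  unfold Spec_presses
  rw [presses_eq_sum, presses_alt_eq_sum, key_sum]
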